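-- pv_equiv track=rewrite | github.com/cekkr/VerilogSee | adHocRegex.py | _check_keyword
-- ===== SOURCE A (Python) =====
-- from typing import Dict, List, Tuple, Optional, Union, Any
--
-- def _check_keyword(line: str, col_idx: int) -> Optional[Tuple[str, int]]:
--     """Check if position is at a keyword"""
--     keywords = ["function", "if", "else", "for", "while", "return"]
--     for keyword in keywords:
--         if line[col_idx:].startswith(keyword):
--             # Make sure it's a complete token
--             next_idx = col_idx + len(keyword)
--             if next_idx >= len(line) or line[next_idx].isspace() or line[next_idx] in "({;:":
--                 return keyword, next_idx
--     return None
-- ===== SOURCE B (Python) =====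
-- _KEYWORDS = {"function", "if", "else", "for", "while", "return"}
--
-- def _check_keyword(line, col_idx):
--     """Check if position is at a keyword: scan the alpha token once, then a set lookup."""
--     rest = line[col_idx:]
--     i = 0
--     while i < len(rest) and rest[i].isalpha():
--         i += 1
--     word = rest[:i]
--     if word in _KEYWORDS and (i == len(rest) or rest[i].isspace() or rest[i] in "({;:"):
--         return word, col_idx + i
--     return None
-- ===== Notes on version B (the rewrite author's own statement) =====
-- stated objective: alternative
-- what changed: A tries each of the six keywords as a prefix of line[col_idx:] and re-checks the token boundary per keyword; B scans the alpha token at col_idx once, looks it up in a keyword set, and does a single boundary check.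
-- outside the precondition, e.g. on _check_keyword('onicif', -2): A returns None, B returns ('if', 0); on _check_keyword('if', -10): A raises IndexError, B returns ('if', -8)
import Mathlib
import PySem

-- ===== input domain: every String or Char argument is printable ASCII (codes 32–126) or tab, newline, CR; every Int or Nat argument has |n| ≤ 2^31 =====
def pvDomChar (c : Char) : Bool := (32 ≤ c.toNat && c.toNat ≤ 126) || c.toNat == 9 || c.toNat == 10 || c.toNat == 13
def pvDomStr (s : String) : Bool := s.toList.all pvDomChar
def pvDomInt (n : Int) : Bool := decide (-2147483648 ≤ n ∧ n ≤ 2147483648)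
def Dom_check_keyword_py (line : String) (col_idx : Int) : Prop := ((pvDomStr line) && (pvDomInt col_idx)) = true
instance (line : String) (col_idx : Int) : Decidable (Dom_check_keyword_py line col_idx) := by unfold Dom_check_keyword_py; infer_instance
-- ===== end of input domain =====

-- B replaces A's per-keyword prefix loop by one scan of the alpha token followed by a set
-- lookup and a single boundary check (objective: alternative decomposition, same cost).

-- `c.isspace() or c in "({;:"` — for the single char c, `in` is char membership (exact);
-- shared by both ports because both Python versions contain this very test.
def pvBoundary (c : Char) : Bool :=
  PySem.Chars.isspace c || ['(', '{', ';', ':'].contains c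

-- ===== PORT A =====
-- the `for keyword in keywords` loop, iterating over the remaining keywords
def pvALoop (line : String) (col_idx : Int) : List String → Option (String × Int)
  | [] => none
  | k :: ks =>
    if PySem.Str.startswith (PySem.Str.slice line (some col_idx) none) k then
      let next_idx := col_idx + PySem.Str.len k
      if next_idx ≥ PySem.Str.len line then some (k, next_idx)
      else
        match PySem.Str.pyGet? line next_idx with
        | none => none   -- IndexError (reachable only for col_idx < 0, outside Pre_)
        | some c => if pvBoundary c then some (k, next_idx) else pvALoop line col_idx ks
    else pvALoop line col_idx ks

def check_keyword_py (line : String) (col_idx : Int) : Option (String × Int) :=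
  pvALoop line col_idx ["function", "if", "else", "for", "while", "return"]

-- ===== PORT B =====
def pvKeywordSet : PySem.Set String :=
  PySem.Set.ofList ["function", "if", "else", "for", "while", "return"]

-- `i == len(rest) or rest[i].isspace() or rest[i] in "({;:"`, with rest[i:] the part
-- the while loop did not consume
def pvBndB (tail : List Char) : Bool :=
  match tail with
  | [] => true
  | c :: _ => pvBoundary c

def check_keyword_py_alt (line : String) (col_idx : Int) : Option (String × Int) :=
  let rest := (PySem.Str.slice line (some col_idx) none).toList
  -- the `while i < len(rest) and rest[i].isalpha(): i += 1` scan: word = rest[:i], tail = rest[i:]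
  let word := rest.takeWhile PySem.Chars.isalpha
  let tail := rest.dropWhile PySem.Chars.isalpha
  if PySem.Set.contains pvKeywordSet (String.ofList word) && pvBndB tail then
    some (String.ofList word, col_idx + (word.length : Int))
  else none

-- ===== PRECONDITION & SPEC =====
-- Pre_ excludes negative col_idx: there A either raises IndexError (line[next_idx] with a
-- large negative index) or returns a result through Python's negative-slice/index wraparound,
-- an accident of A's implementation that a column index never exercises.
def Pre_check_keyword_py (line : String) (col_idx : Int) : Prop := 0 ≤ col_idx
instance (line : String) (col_idx : Int) : Decidable (Pre_check_keyword_py line col_idx) := by unfold Pre_check_keyword_py; infer_instance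

def pvWitness_check_keyword_py : String × Int := ("if (a)", 0)

def Spec_check_keyword_py (line : String) (col_idx : Int) (out : Option (String × Int)) : Prop := out = check_keyword_py_alt line col_idx
instance (line : String) (col_idx : Int) (out : Option (String × Int)) : Decidable (Spec_check_keyword_py line col_idx out) := by unfold Spec_check_keyword_py; infer_instance

-- ===== CLAIM (what is proved, stated in full; the proofs are below) =====
def Claim_equal_check_keyword_py : Prop := ∀ (line : String) (col_idx : Int), Dom_check_keyword_py line col_idx → Pre_check_keyword_py line col_idx → Spec_check_keyword_py line col_idx (check_keyword_py line col_idx)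

-- ===== LEMMAS AND PROOFS =====

-- a boundary character is never alphabetic (spaces and the four punctuation marks)
theorem pv_alpha_space (c : Char) (h : PySem.Chars.isspace c = true) :
    PySem.Chars.isalpha c = false := by
  by_contra hc
  have h2 : PySem.Chars.isalpha c = true := by simpa using hc
  simp only [PySem.Chars.isalpha, PySem.Chars.isupper, PySem.Chars.islower, Bool.or_eq_true,
    Bool.and_eq_true, decide_eq_true_eq, Char.le_def, UInt32.le_iff_toNat_le,
    show ('A'.val.toNat = 65) from rfl, show ('Z'.val.toNat = 90) from rfl,
    show ('a'.val.toNat = 97) from rfl, show ('z'.val.toNat = 122) from rfl] at h2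
  unfold PySem.Chars.isspace at h
  simp only [Bool.or_eq_true, Bool.and_eq_true, decide_eq_true_eq, Char.toNat] at h
  omega

theorem pv_boundary_not_alpha (c : Char) (h : pvBoundary c = true) :
    PySem.Chars.isalpha c = false := by
  simp only [pvBoundary, Bool.or_eq_true] at h
  rcases h with h | h
  · exact pv_alpha_space c h
  · have hm : c ∈ ['(', '{', ';', ':'] := by simpa using h
    simp only [List.mem_cons, List.not_mem_nil, or_false] at hm
    rcases hm with h | h | h | h <;> subst h <;> decide

-- A's per-keyword success test ↔ "the alpha run is exactly this keyword and ends at a boundary"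
theorem pv_cond_iff (r k : List Char) (hal : ∀ c ∈ k, PySem.Chars.isalpha c = true) :
    (k <+: r ∧ (r.length ≤ k.length ∨ ∃ c, r[k.length]? = some c ∧ pvBoundary c = true))
      ↔ (r.takeWhile PySem.Chars.isalpha = k ∧ pvBndB (r.dropWhile PySem.Chars.isalpha) = true) := by
  constructor
  · rintro ⟨⟨t, rfl⟩, hb⟩
    cases t with
    | nil =>
      refine ⟨?_, ?_⟩
      · simpa using List.takeWhile_eq_self_iff.mpr hal
      · have hd : (k ++ ([] : List Char)).dropWhile PySem.Chars.isalpha = [] := by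
          simpa using List.dropWhile_eq_nil_iff.mpr hal
        rw [hd]
        rfl
    | cons c t' =>
      have hget : (k ++ c :: t')[k.length]? = some c := by
        rw [List.getElem?_append_right le_rfl]
        simp
      rcases hb with hb | ⟨c', hc', hbc⟩
      · exfalso
        simp only [List.length_append, List.length_cons] at hb
        omega
      · have hcc : c' = c := by rw [hget] at hc'; exact (Option.some_inj.mp hc').symm
        subst hcc
        have hna := pv_boundary_not_alpha _ hbc
        refine ⟨?_, ?_⟩
        · rw [List.takeWhile_append_of_pos hal, List.takeWhile_cons, hna]
          simp
        · rw [List.dropWhile_append_of_pos hal, List.dropWhile_cons, hna]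
          simpa [pvBndB] using hbc
  · rintro ⟨hw, hb⟩
    have hr : r = k ++ r.dropWhile PySem.Chars.isalpha := by
      conv_lhs => rw [← List.takeWhile_append_dropWhile (p := PySem.Chars.isalpha) (l := r)]
      rw [hw]
    refine ⟨⟨_, hr.symm⟩, ?_⟩
    cases hd : r.dropWhile PySem.Chars.isalpha with
    | nil => left; rw [hr, hd]; simp
    | cons c t' =>
      right
      refine ⟨c, ?_, ?_⟩
      · rw [hr, hd, List.getElem?_append_right le_rfl]
        simp
      · rw [hd] at hb
        simpa [pvBndB] using hb

-- one step of A's keyword loop, rephrased through the alpha run of line[col_idx:]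
theorem pv_aloop_cons (line : String) (j : Nat) (k : String) (ks : List String)
    (hal : ∀ c ∈ k.toList, PySem.Chars.isalpha c = true) :
    pvALoop line (j : Int) (k :: ks) =
      if ((line.toList.drop j).takeWhile PySem.Chars.isalpha = k.toList ∧
          pvBndB ((line.toList.drop j).dropWhile PySem.Chars.isalpha) = true) then
        some (k, (j : Int) + (k.toList.length : Int))
      else pvALoop line (j : Int) ks := by
  have hsw : PySem.Str.startswith (PySem.Str.slice line (some (j : Int)) none) k = true ↔
      k.toList <+: line.toList.drop j := by
    rw [PySem.Str.startswith_eq, PySem.Chars.startswith_iff, PySem.Str.toList_slice,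
      PySem.Chars.slice_eq_listSlice, PySem.List.slice_from_natCast]
  by_cases hpre : k.toList <+: line.toList.drop j
  · rw [pvALoop, if_pos (hsw.mpr hpre)]
    simp only [PySem.Str.len_eq]
    by_cases hge : line.toList.length ≤ j + k.toList.length
    · rw [if_pos (by omega)]
      rw [if_pos ((pv_cond_iff _ _ hal).mp ⟨hpre, Or.inl (by simp only [List.length_drop]; omega)⟩)]
    · rw [if_neg (by omega)]
      have hlt : j + k.toList.length < line.toList.length := by omega
      have hcast : (j : Int) + (k.toList.length : Int) = ((j + k.toList.length : Nat) : Int) := by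
        push_cast; ring
      have hget : PySem.Str.pyGet? line ((j : Int) + (k.toList.length : Int)) =
          some (line.toList[j + k.toList.length]'hlt) := by
        rw [hcast, PySem.Str.pyGet?_natCast, List.getElem?_eq_getElem hlt]
      have hgetr : (line.toList.drop j)[k.toList.length]? =
          some (line.toList[j + k.toList.length]'hlt) := by
        rw [List.getElem?_drop, List.getElem?_eq_getElem hlt]
      rw [hget]
      simp only []
      by_cases hbc : pvBoundary (line.toList[j + k.toList.length]'hlt) = true
      · rw [if_pos hbc, if_pos ((pv_cond_iff _ _ hal).mp ⟨hpre, Or.inr ⟨_, hgetr, hbc⟩⟩)]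
      · rw [if_neg hbc, if_neg]
        intro hc
        rcases ((pv_cond_iff _ _ hal).mpr hc).2 with hlen | ⟨c', hc', hbc'⟩
        · simp only [List.length_drop] at hlen; omega
        · rw [hgetr] at hc'
          exact hbc (Option.some_inj.mp hc' ▸ hbc')
  · rw [pvALoop, if_neg (fun h => hpre (hsw.mp h)), if_neg]
    rintro ⟨hw, -⟩
    exact hpre (hw ▸ List.takeWhile_prefix _)

set_option maxRecDepth 10000 in
theorem check_keyword_py_eq (line : String) (j : Nat) :
    check_keyword_py line (j : Int) = check_keyword_py_alt line (j : Int) := by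
  unfold check_keyword_py check_keyword_py_alt
  rw [pv_aloop_cons _ _ _ _ (by intro c hc; rw [show "function".toList = ['f','u','n','c','t','i','o','n'] from rfl] at hc; fin_cases hc <;> decide),
    pv_aloop_cons _ _ _ _ (by intro c hc; rw [show "if".toList = ['i','f'] from rfl] at hc; fin_cases hc <;> decide),
    pv_aloop_cons _ _ _ _ (by intro c hc; rw [show "else".toList = ['e','l','s','e'] from rfl] at hc; fin_cases hc <;> decide),
    pv_aloop_cons _ _ _ _ (by intro c hc; rw [show "for".toList = ['f','o','r'] from rfl] at hc; fin_cases hc <;> decide),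
    pv_aloop_cons _ _ _ _ (by intro c hc; rw [show "while".toList = ['w','h','i','l','e'] from rfl] at hc; fin_cases hc <;> decide),
    pv_aloop_cons _ _ _ _ (by intro c hc; rw [show "return".toList = ['r','e','t','u','r','n'] from rfl] at hc; fin_cases hc <;> decide)]
  simp only [PySem.Str.toList_slice, PySem.Chars.slice_eq_listSlice, PySem.List.slice_from_natCast]
  set r := line.toList.drop j with hrdef
  set w := r.takeWhile PySem.Chars.isalpha with hwdef
  set tl := r.dropWhile PySem.Chars.isalpha with htdef
  by_cases hb : pvBndB tl = true
  · simp only [hb, and_true, Bool.and_true]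
    have hofl : ∀ s : String, String.ofList w = s → w = s.toList := by
      intro s hs; rw [← hs]; simp
    by_cases h1 : w = "function".toList
    · rw [if_pos h1, h1]; simp; decide
    · rw [if_neg h1]
      by_cases h2 : w = "if".toList
      · rw [if_pos h2, h2]; simp; decide
      · rw [if_neg h2]
        by_cases h3 : w = "else".toList
        · rw [if_pos h3, h3]; simp; decide
        · rw [if_neg h3]
          by_cases h4 : w = "for".toList
          · rw [if_pos h4, h4]; simp; decide
          · rw [if_neg h4]
            by_cases h5 : w = "while".toList
            · rw [if_pos h5, h5]; simp; decide
            · rw [if_neg h5]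
              by_cases h6 : w = "return".toList
              · rw [if_pos h6, h6]; simp; decide
              · rw [if_neg h6, pvALoop]
                have hcon : PySem.Set.contains pvKeywordSet (String.ofList w) = false := by
                  have hset : pvKeywordSet = ["function", "if", "else", "for", "while", "return"] := by decide
                  rw [hset]
                  simp only [PySem.Set.contains, List.contains_eq_mem, decide_eq_false_iff_not,
                    List.mem_cons, List.not_mem_nil, or_false]
                  rintro (h | h | h | h | h | h)
                  · exact h1 (hofl _ h)
                  · exact h2 (hofl _ h)
                  · exact h3 (hofl _ h)
                  · exact h4 (hofl _ h)
                  · exact h5 (hofl _ h)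
                  · exact h6 (hofl _ h)
                rw [hcon]
                simp
  · have hb' : pvBndB tl = false := by simpa using hb
    simp only [hb', Bool.and_false, pvALoop]
    simp

-- ===== VERDICT (by name: the statement is the Claim_ definition above) =====
theorem check_keyword_py_spec : Claim_equal_check_keyword_py := by
  intro line col_idx hdom hpre
  unfold Spec_check_keyword_py
  obtain ⟨j, rfl⟩ : ∃ j : Nat, col_idx = (j : Int) :=
    ⟨col_idx.toNat, (Int.toNat_of_nonneg hpre).symm⟩
  exact check_keyword_py_eq line j
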